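-- pv_equiv track=rewrite | github.com/Jang99u/Study | Algorithm/BAEKJOON/1407.py | func
-- ===== SOURCE A (Python) =====
-- def func(num) :
--     c = 2
--     result = (num + 1) // 2 # 홀수 항들의 경우의 합
--     while num >= 1 :
--         num //= 2
--         cnt = (num + 1) // 2
--         result += cnt * c
--         c *= 2
--     return result
-- ===== SOURCE B (Python) =====
-- def func(num):
--     if num < 1:
--         return (num + 1) // 2
--     return (num + 1) // 2 + 2 * func(num // 2)
-- ===== Notes on version B (the rewrite author's own statement) =====
-- stated objective: simpler
-- what changed: Replaces the explicit while-loop that threads a doubling weight c and an accumulator with a direct recursion on the halving of num, where each deeper level's contribution is simply doubled.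
import Mathlib
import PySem

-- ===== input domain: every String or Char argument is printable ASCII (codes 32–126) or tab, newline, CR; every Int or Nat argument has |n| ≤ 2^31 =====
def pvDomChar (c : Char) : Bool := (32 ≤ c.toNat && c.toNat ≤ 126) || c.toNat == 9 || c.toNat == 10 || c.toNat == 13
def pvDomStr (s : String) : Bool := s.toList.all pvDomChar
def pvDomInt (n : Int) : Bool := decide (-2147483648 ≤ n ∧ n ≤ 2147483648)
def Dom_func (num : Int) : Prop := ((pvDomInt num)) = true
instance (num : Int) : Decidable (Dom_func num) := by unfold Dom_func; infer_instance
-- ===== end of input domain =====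

-- B replaces A's while-loop (accumulator + doubling weight c) with a direct recursion on the halving of num; same cost, plainer.

-- ===== PORT A =====
-- the while loop: state (num, c, result); terminates because num//2 shrinks num.toNat when num ≥ 1
def funcLoop (num c result : Int) : Int :=
  if _ : num ≥ 1 then
    let num' := PySem.Int.floordiv num 2
    let cnt := PySem.Int.floordiv (num' + 1) 2
    funcLoop num' (c * 2) (result + cnt * c)
  else result
termination_by num.toNat
decreasing_by
  have h2 : PySem.Int.floordiv num 2 = num / 2 := PySem.Int.floordiv_eq_ediv_of_pos (by omega)
  simp only [h2]; omega

def func (num : Int) : Int :=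
  funcLoop num 2 (PySem.Int.floordiv (num + 1) 2)

-- ===== PORT B =====
def func_alt (num : Int) : Int :=
  if _ : num < 1 then PySem.Int.floordiv (num + 1) 2
  else PySem.Int.floordiv (num + 1) 2 + 2 * func_alt (PySem.Int.floordiv num 2)
termination_by num.toNat
decreasing_by
  have h2 : PySem.Int.floordiv num 2 = num / 2 := PySem.Int.floordiv_eq_ediv_of_pos (by omega)
  simp only [h2]; omega

-- ===== PRECONDITION & SPEC =====
def Spec_func (num : Int) (out : Int) : Prop := out = func_alt num
instance (num : Int) (out : Int) : Decidable (Spec_func num out) := by unfold Spec_func; infer_instance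

-- ===== CLAIM (what is proved, stated in full; the proofs are below) =====
def Claim_equal_func : Prop := ∀ (num : Int), Dom_func num → Spec_func num (func num)

-- ===== LEMMAS AND PROOFS =====
lemma alt_unfold (n : Int) : func_alt n =
    PySem.Int.floordiv (n + 1) 2 + (if n < 1 then 0 else 2 * func_alt (PySem.Int.floordiv n 2)) := by
  rw [func_alt]
  split_ifs <;> ring

lemma funcLoop_eq (k : Nat) : ∀ (num : Int), num.toNat ≤ k → ∀ (c r : Int),
    funcLoop num c r = r + c * (if num ≥ 1 then func_alt (PySem.Int.floordiv num 2) else 0) := by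
  induction k with
  | zero =>
    intro num hn c r
    have h1 : ¬ num ≥ 1 := by omega
    rw [funcLoop, dif_neg h1, if_neg h1]
    ring
  | succ k ih =>
    intro num hn c r
    by_cases h1 : num ≥ 1
    · have h2 : PySem.Int.floordiv num 2 = num / 2 := PySem.Int.floordiv_eq_ediv_of_pos (by omega)
      rw [funcLoop, dif_pos h1, if_pos h1]
      rw [ih (PySem.Int.floordiv num 2) (by rw [h2]; omega)]
      rw [alt_unfold (PySem.Int.floordiv num 2)]
      by_cases h3 : PySem.Int.floordiv num 2 < 1
      · rw [if_pos h3, if_neg (by omega : ¬ PySem.Int.floordiv num 2 ≥ 1)]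
        ring
      · rw [if_neg h3, if_pos (by omega : PySem.Int.floordiv num 2 ≥ 1)]
        ring
    · rw [funcLoop, dif_neg h1, if_neg h1]
      ring

-- ===== VERDICT (by name: the statement is the Claim_ definition above) =====
theorem func_spec : Claim_equal_func := by
  intro num _
  unfold Spec_func func
  rw [funcLoop_eq num.toNat num le_rfl]
  rw [alt_unfold num]
  by_cases h : num < 1
  · rw [if_pos h, if_neg (by omega : ¬ num ≥ 1)]
    ring
  · rw [if_neg h, if_pos (by omega : num ≥ 1)]
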